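-- pv_equiv track=rewrite | github.com/randti/xperiments | ades2.py | built
-- ===== SOURCE A (Python) =====
-- def built(n,g):
--     for v in range(1,10):
--         a=[0]*n
--         for j in range(1,n):
--             a[j-1]=v
--             for k in range(10):
--                 for p in range(j,n):
--                     a[p]=k
--                 b=a.copy()
--                 if len(set(b))!=1:
--                     b = int(''.join([str(i) for i in a]))
--                     if b%g==0 and b!=g:
--                         return b
-- ===== SOURCE B (Python) =====
-- def built(n, g):
--     for v in range(1, 10):
--         best = None  # (j, k, b): hit with smallest (j, k) so far
--         for k in range(10):
--             if k == v:
--                 continue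
--             limit = best[0] if best else n
--             for j in range(1, limit):
--                 b = int(str(v) * j + str(k) * (n - j))
--                 if b % g == 0 and b != g:
--                     best = (j, k, b)
--                     break
--         if best:
--             return best[2]
-- ===== Notes on version B (the rewrite author's own statement) =====
-- stated objective: alternative
-- what changed: B swaps the loop nesting (suffix digit k outer, split point j inner), keeps a best-so-far hit and prunes each later scan to split points below the current best, returning the lexicographically first (j,k) hit per prefix digit v, instead of A's j-major rescan that rewrites, copies, set()-scans, joins and re-parses a length-n array for every candidate.
-- outside the precondition, e.g. on built(2, 0): A raises ZeroDivisionError, B raises ZeroDivisionError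
import Mathlib
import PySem

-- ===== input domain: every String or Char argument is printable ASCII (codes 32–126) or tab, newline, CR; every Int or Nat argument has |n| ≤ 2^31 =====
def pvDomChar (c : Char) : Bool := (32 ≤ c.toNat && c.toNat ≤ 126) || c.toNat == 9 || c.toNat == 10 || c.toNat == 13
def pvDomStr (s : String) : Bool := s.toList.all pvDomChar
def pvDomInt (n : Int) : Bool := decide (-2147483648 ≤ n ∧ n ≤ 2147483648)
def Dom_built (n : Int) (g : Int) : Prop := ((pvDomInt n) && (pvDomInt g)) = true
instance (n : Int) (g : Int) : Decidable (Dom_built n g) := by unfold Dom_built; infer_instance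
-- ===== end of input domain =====

-- B swaps the loop nesting (suffix digit k outer, split point j inner) and keeps a pruned
-- best-so-far hit (the lexicographically least (j,k) hit per prefix digit) instead of A's
-- per-candidate array rewriting/copying/set()-scan/reparse; objective: alternative.

-- ===== PORT A =====
-- inner 'for k in range(10)' body: rewrites a[j:] to k, tests len(set)!=1, parses and tests divisibility
def aK (g n j : Int) (st : List Int × Option Int) (k : Int) : List Int × Option Int :=
  match st with
  | (a, some x) => (a, some x)
  | (a, none) =>
    let a2 := (PySem.List.pyRange j n 1).foldl (fun acc p => acc.set p.toNat k) a
    if (PySem.Set.ofList a2).length ≠ 1 then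
      -- int(''.join([str(i) for i in a])); the parse never fails on these digit strings, .getD 0 is unreachable
      let b2 := (PySem.Int.ofChars? (PySem.Chars.join [] (a2.map PySem.Int.toChars))).getD 0
      if PySem.Int.mod b2 g = 0 ∧ b2 ≠ g then (a2, some b2) else (a2, none)
    else (a2, none)

-- 'for j in range(1,n)' body: a[j-1]=v then the k loop; the list a threads across iterations
def aJ (g n v : Int) (st : List Int × Option Int) (j : Int) : List Int × Option Int :=
  match st with
  | (a, some x) => (a, some x)
  | (a, none) => (PySem.List.pyRange 0 10 1).foldl (aK g n j) (a.set (j - 1).toNat v, none)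

def built (n : Int) (g : Int) : Option Int :=
  (PySem.List.pyRange 1 10 1).foldl
    (fun r v =>
      match r with
      | some x => some x
      | none => ((PySem.List.pyRange 1 n 1).foldl (aJ g n v) (List.replicate n.toNat 0, none)).2)
    none

-- ===== PORT B =====
-- inner 'for j in range(1, limit)' with break: first hit (j, k, b) below limit, as a short-circuit fold
def bFind (n g v k : Int) (st : Option (Int × Int × Int)) (j : Int) : Option (Int × Int × Int) :=
  match st with
  | some r => some r
  | none =>
    -- int(str(v)*j + str(k)*(n-j)); the parse never fails on these digit strings, .getD 0 is unreachable
    let b := (PySem.Int.ofChars? (PySem.List.pyRepeat (PySem.Int.toChars v) j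
                ++ PySem.List.pyRepeat (PySem.Int.toChars k) (n - j))).getD 0
    if PySem.Int.mod b g = 0 ∧ b ≠ g then some (j, k, b) else none

-- 'for k in range(10)' body: skip k == v, scan j below the current best split point, update best
def bKstep (n g v : Int) (best : Option (Int × Int × Int)) (k : Int) : Option (Int × Int × Int) :=
  if k = v then best
  else
    let limit := match best with | some r => r.1 | none => n
    match (PySem.List.pyRange 1 limit 1).foldl (bFind n g v k) none with
    | some r => some r
    | none => best

def built_alt (n : Int) (g : Int) : Option Int :=
  (PySem.List.pyRange 1 10 1).foldl
    (fun res v =>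
      match res with
      | some x => some x
      | none =>
        match (PySem.List.pyRange 0 10 1).foldl (bKstep n g v) none with
        | some r => some r.2.2
        | none => none)
    none

-- ===== PRECONDITION & SPEC =====
-- Pre_ excludes exactly (n ≥ 2, g = 0): there the first candidate reaches 'b % g' and Python raises ZeroDivisionError
def Pre_built (n : Int) (g : Int) : Prop := n ≤ 1 ∨ g ≠ 0
instance (n : Int) (g : Int) : Decidable (Pre_built n g) := by unfold Pre_built; infer_instance
def pvWitness_built : Int × Int := (3, 7)

def Spec_built (n : Int) (g : Int) (out : Option Int) : Prop := out = built_alt n g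
instance (n : Int) (g : Int) (out : Option Int) : Decidable (Spec_built n g out) := by unfold Spec_built; infer_instance

-- ===== CLAIM (what is proved, stated in full; the proofs are below) =====
def Claim_equal_built : Prop := ∀ (n : Int) (g : Int), Dom_built n g → Pre_built n g → Spec_built n g (built n g)

-- ===== LEMMAS AND PROOFS =====

-- ---- proof-side clean form of A's per-(v) scan: j-major string scan (no array state) ----
def sK (g n v j : Int) (head : List Char) (r : Option Int) (k : Int) : Option Int :=
  match r with
  | some x => some x
  | none =>
    if k ≠ v then
      let b := (PySem.Int.ofChars? (head ++ PySem.List.pyRepeat (PySem.Int.toChars k) (n - j))).getD 0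
      if PySem.Int.mod b g = 0 ∧ b ≠ g then some b else none
    else none

def sJ (g n v : Int) (sv : List Char) (r : Option Int) (j : Int) : Option Int :=
  match r with
  | some x => some x
  | none => (PySem.List.pyRange 0 10 1).foldl (sK g n v j (PySem.List.pyRepeat sv j)) none

-- candidate value and hit tests shared by the proofs
def cval (n v j k : Int) : Int :=
  (PySem.Int.ofChars? (PySem.List.pyRepeat (PySem.Int.toChars v) j
      ++ PySem.List.pyRepeat (PySem.Int.toChars k) (n - j))).getD 0

def pokB (n g v j k : Int) : Bool :=
  decide (PySem.Int.mod (cval n v j k) g = 0 ∧ cval n v j k ≠ g)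

def hitB (n g v j k : Int) : Bool := decide (k ≠ v) && pokB n g v j k

-- once a result is found, every remaining iteration is the identity
lemma aK_keep (g n j : Int) (ks : List Int) (a : List Int) (x : Int) :
    ks.foldl (aK g n j) (a, some x) = (a, some x) := by
  induction ks with
  | nil => rfl
  | cons k ks ih => simpa [aK] using ih

lemma aJ_keep (g n v : Int) (js : List Int) (a : List Int) (x : Int) :
    js.foldl (aJ g n v) (a, some x) = (a, some x) := by
  induction js with
  | nil => rfl
  | cons j js ih => simpa [aJ] using ih

lemma sK_keep (g n v j : Int) (head : List Char) (ks : List Int) (x : Int) :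
    ks.foldl (sK g n v j head) (some x) = some x := by
  induction ks with
  | nil => rfl
  | cons k ks ih => simpa [sK] using ih

lemma sJ_keep (g n v : Int) (sv : List Char) (js : List Int) (x : Int) :
    js.foldl (sJ g n v sv) (some x) = some x := by
  induction js with
  | nil => rfl
  | cons j js ih => simpa [sJ] using ih

lemma bFind_keep (n g v k : Int) (js : List Int) (r : Int × Int × Int) :
    js.foldl (bFind n g v k) (some r) = some r := by
  induction js with
  | nil => rfl
  | cons j js ih => simpa [bFind] using ih

-- a[len(pre)] = y on pre ++ x :: t
lemma set_boundary (pre t : List Int) (x y : Int) :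
    (pre ++ x :: t).set pre.length y = pre ++ y :: t := by
  induction pre with
  | nil => rfl
  | cons p pre ih => simp [ih]

-- 'for p in range(j,n): a[p]=k' rewrites the suffix after position j to k
lemma rewrite_loop (k : Int) :
    ∀ (t pre : List Int) (j : Int), 0 ≤ j → j.toNat = pre.length →
      (PySem.List.pyRange j (j + (t.length : Int)) 1).foldl (fun acc p => acc.set p.toNat k) (pre ++ t)
        = pre ++ List.replicate t.length k := by
  intro t
  induction t with
  | nil =>
    intro pre j hj hlen
    simp [PySem.List.pyRange_one_eq_nil (le_refl j)]
  | cons x t ih =>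
    intro pre j hj hlen
    have hlt : j < j + ((x :: t).length : Int) := by simp
    rw [PySem.List.pyRange_one_cons hlt]
    simp only [List.foldl_cons]
    have h1 : (pre ++ x :: t).set j.toNat k = (pre ++ [k]) ++ t := by
      rw [hlen, set_boundary]; simp
    have h2 : j + ((x :: t).length : Int) = (j + 1) + (t.length : Int) := by
      push_cast [List.length_cons]; ring
    rw [h1, h2, ih (pre ++ [k]) (j + 1) (by omega) (by simp [List.length_append]; omega)]
    simp [List.replicate_succ]

-- ''.join with empty separator concatenates
lemma join_empty_sep (parts : List (List Char)) : PySem.Chars.join [] parts = parts.flatten := by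
  induction parts with
  | nil => simp [PySem.Chars.join_nil]
  | cons p rest ih =>
    cases rest with
    | nil => simp [PySem.Chars.join_singleton]
    | cons q r => rw [PySem.Chars.join_cons_cons]; simp [ih]

-- ''.join(str(d) for d in rep(J,v)++rep(M,k)) is str(v)*J ++ str(k)*M
lemma join_digits (J M : Nat) (v k : Int) :
    PySem.Chars.join [] ((List.replicate J v ++ List.replicate M k).map PySem.Int.toChars)
      = (List.replicate J (PySem.Int.toChars v)).flatten ++ (List.replicate M (PySem.Int.toChars k)).flatten := by
  rw [List.map_append, List.map_replicate, List.map_replicate, join_empty_sep, List.flatten_append]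

lemma ofList_replicate (J : Nat) (hJ : 0 < J) (v : Int) :
    PySem.Set.ofList (List.replicate J v) = [v] := by
  induction J with
  | zero => omega
  | succ J ih =>
    rcases Nat.eq_zero_or_pos J with h | h
    · subst h; simp [PySem.Set.ofList_cons, PySem.Set.ofList_nil, PySem.Set.discard]
    · rw [List.replicate_succ, PySem.Set.ofList_cons, ih h]
      simp [PySem.Set.discard]

lemma update_replicate_mem (M : Nat) (s : List Int) (k : Int) (h : k ∈ s) :
    PySem.Set.update s (List.replicate M k) = s := by
  induction M with
  | zero => simp [PySem.Set.update_nil]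
  | succ M ih => rw [List.replicate_succ, PySem.Set.update_cons, PySem.Set.add_of_mem h]; exact ih

-- len(set(a)) != 1 on rep(J,v)++rep(M,k) with J,M >= 1 is exactly k != v
lemma setlen_iff (J M : Nat) (hJ : 0 < J) (hM : 0 < M) (v k : Int) :
    ((PySem.Set.ofList (List.replicate J v ++ List.replicate M k)).length ≠ 1) ↔ ¬ (k = v) := by
  rw [PySem.Set.ofList_append, ofList_replicate J hJ v]
  by_cases h : k = v
  · subst h
    rw [update_replicate_mem M [k] k (by simp)]
    simp
  · obtain ⟨M', rfl⟩ : ∃ M', M = M' + 1 := ⟨M - 1, by omega⟩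
    rw [List.replicate_succ, PySem.Set.update_cons,
        PySem.Set.add_of_not_mem (by simp [h]),
        update_replicate_mem M' ([v] ++ [k]) k (by simp)]
    simp [h]

-- the 'for k' loops of A and the clean scan agree; A's list stays 'rep(j,v) ++ (n-j digits)'
lemma k_loop (g n v j : Int) (hj : 1 ≤ j) (hjn : j < n) :
    ∀ (ks : List Int), (∀ k ∈ ks, 0 ≤ k) →
      ∀ (t : List Int), j + (t.length : Int) = n →
        ∃ t' : List Int, t'.length = t.length ∧
          ks.foldl (aK g n j) (List.replicate j.toNat v ++ t, none)
            = (List.replicate j.toNat v ++ t',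
               ks.foldl (sK g n v j (PySem.List.pyRepeat (PySem.Int.toChars v) j)) none) := by
  intro ks
  induction ks with
  | nil => exact fun _ t _ => ⟨t, rfl, rfl⟩
  | cons k ks ih =>
    intro hks t ht
    have hks' : ∀ k ∈ ks, 0 ≤ k := fun k hk => hks k (by simp [hk])
    have hM : 0 < t.length := by omega
    have hJ : 0 < j.toNat := by omega
    have hnj : (n - j).toNat = t.length := by omega
    simp only [List.foldl_cons]
    have ha2 : (PySem.List.pyRange j n 1).foldl (fun acc p => acc.set p.toNat k)
        (List.replicate j.toNat v ++ t)
        = List.replicate j.toNat v ++ List.replicate t.length k := by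
      have h := rewrite_loop k t (List.replicate j.toNat v) j (by omega) (by simp)
      rwa [ht] at h
    have hstr : PySem.Chars.join []
          ((List.replicate j.toNat v ++ List.replicate t.length k).map PySem.Int.toChars)
        = PySem.List.pyRepeat (PySem.Int.toChars v) j
            ++ PySem.List.pyRepeat (PySem.Int.toChars k) (n - j) := by
      rw [join_digits]
      simp [PySem.List.pyRepeat, hnj]
    by_cases hkv : k = v
    · -- digits all equal: A's set-test fails, the clean scan skips via k != v
      have hA : aK g n j (List.replicate j.toNat v ++ t, none) k
          = (List.replicate j.toNat v ++ List.replicate t.length k, none) := by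
        simp only [aK]
        rw [ha2, if_neg (by rw [setlen_iff j.toNat t.length hJ hM v k]; simp [hkv])]
      have hB : sK g n v j (PySem.List.pyRepeat (PySem.Int.toChars v) j) none k = none := by
        simp only [sK]
        rw [if_neg (by simp [hkv])]
      rw [hA, hB]
      obtain ⟨t', h1, h2⟩ := ih hks' (List.replicate t.length k) (by simpa using ht)
      exact ⟨t', by simpa using h1, h2⟩
    · -- candidate examined by both, with the identical digit string
      have hcond : ((PySem.Set.ofList (List.replicate j.toNat v ++ List.replicate t.length k)).length ≠ 1) := by
        rw [setlen_iff j.toNat t.length hJ hM v k]; exact hkv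
      have hA : aK g n j (List.replicate j.toNat v ++ t, none) k
          = (List.replicate j.toNat v ++ List.replicate t.length k,
             if PySem.Int.mod ((PySem.Int.ofChars? (PySem.List.pyRepeat (PySem.Int.toChars v) j
                    ++ PySem.List.pyRepeat (PySem.Int.toChars k) (n - j))).getD 0) g = 0
                ∧ ((PySem.Int.ofChars? (PySem.List.pyRepeat (PySem.Int.toChars v) j
                    ++ PySem.List.pyRepeat (PySem.Int.toChars k) (n - j))).getD 0) ≠ g
             then some ((PySem.Int.ofChars? (PySem.List.pyRepeat (PySem.Int.toChars v) j
                    ++ PySem.List.pyRepeat (PySem.Int.toChars k) (n - j))).getD 0)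
             else none) := by
        simp only [aK]
        rw [ha2, if_pos hcond, hstr]
        split <;> rfl
      have hB : sK g n v j (PySem.List.pyRepeat (PySem.Int.toChars v) j) none k
          = (if PySem.Int.mod ((PySem.Int.ofChars? (PySem.List.pyRepeat (PySem.Int.toChars v) j
                    ++ PySem.List.pyRepeat (PySem.Int.toChars k) (n - j))).getD 0) g = 0
                ∧ ((PySem.Int.ofChars? (PySem.List.pyRepeat (PySem.Int.toChars v) j
                    ++ PySem.List.pyRepeat (PySem.Int.toChars k) (n - j))).getD 0) ≠ g
             then some ((PySem.Int.ofChars? (PySem.List.pyRepeat (PySem.Int.toChars v) j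
                    ++ PySem.List.pyRepeat (PySem.Int.toChars k) (n - j))).getD 0)
             else none) := by
        simp only [sK]
        rw [if_pos hkv]
      rw [hA, hB]
      split
      · -- found: both early-out with the same value
        refine ⟨List.replicate t.length k, by simp, ?_⟩
        rw [aK_keep, sK_keep]
      · obtain ⟨t', h1, h2⟩ := ih hks' (List.replicate t.length k) (by simpa using ht)
        exact ⟨t', by simpa using h1, h2⟩

-- the 'for j' loops of A and the clean scan agree
lemma j_loop (g n v : Int) :
    ∀ (m : Nat) (j : Int) (t : List Int), 1 ≤ j → (n - j).toNat = m →
      (j - 1) + (t.length : Int) = n →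
      ((PySem.List.pyRange j n 1).foldl (aJ g n v) (List.replicate (j - 1).toNat v ++ t, none)).2
        = (PySem.List.pyRange j n 1).foldl (sJ g n v (PySem.Int.toChars v)) none := by
  intro m
  induction m with
  | zero =>
    intro j t hj hm hlen
    rw [PySem.List.pyRange_one_eq_nil (by omega)]
    rfl
  | succ m ih =>
    intro j t hj hm hlen
    have hjn : j < n := by omega
    rw [PySem.List.pyRange_one_cons hjn]
    simp only [List.foldl_cons]
    obtain ⟨x, t'', rfl⟩ : ∃ x t'', t = x :: t'' := by
      cases t with
      | nil => exfalso; simp at hlen; omega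
      | cons a b => exact ⟨a, b, rfl⟩
    have hset : (List.replicate (j - 1).toNat v ++ x :: t'').set (j - 1).toNat v
        = List.replicate j.toNat v ++ t'' := by
      have h := set_boundary (List.replicate (j - 1).toNat v) t'' x v
      rw [List.length_replicate] at h
      rw [h]
      have hj1 : j.toNat = (j - 1).toNat + 1 := by omega
      rw [hj1, List.replicate_succ']
      simp
    simp only [aJ]
    rw [hset]
    obtain ⟨t3, ht3, heq⟩ := k_loop g n v j hj hjn (PySem.List.pyRange 0 10 1)
      (fun k hk => (PySem.List.mem_pyRange_one.mp hk).1) t'' (by simp at hlen ⊢; omega)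
    rw [heq]
    simp only [sJ]
    cases hr : (PySem.List.pyRange 0 10 1).foldl
        (sK g n v j (PySem.List.pyRepeat (PySem.Int.toChars v) j)) none with
    | some x => rw [aJ_keep, sJ_keep]
    | none =>
      have h3 : ((j + 1) - 1) + ((t3.length : Nat) : Int) = n := by
        rw [ht3]; simp at hlen ⊢; omega
      have := ih (j + 1) t3 (by omega) (by omega) h3
      simpa using this

lemma per_v (g n v : Int) :
    ((PySem.List.pyRange 1 n 1).foldl (aJ g n v) (List.replicate n.toNat 0, none)).2
      = (PySem.List.pyRange 1 n 1).foldl (sJ g n v (PySem.Int.toChars v)) none := by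
  by_cases hn : n ≤ 1
  · rw [PySem.List.pyRange_one_eq_nil hn]; rfl
  · have h := j_loop g n v (n - 1).toNat 1 (List.replicate n.toNat 0) le_rfl rfl
      (by simp; omega)
    simpa using h

-- ---- the clean scan as a first-hit search (find?/findSome?) ----

lemma sK_fold_eq (g n v j : Int) (ks : List Int) :
    ks.foldl (sK g n v j (PySem.List.pyRepeat (PySem.Int.toChars v) j)) none
      = (ks.find? (hitB n g v j)).map (cval n v j) := by
  induction ks with
  | nil => rfl
  | cons k ks ih =>
    simp only [List.foldl_cons, List.find?_cons]
    by_cases hk : k = v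
    · have h1 : sK g n v j (PySem.List.pyRepeat (PySem.Int.toChars v) j) none k = none := by
        simp [sK, hk]
      have h2 : hitB n g v j k = false := by simp [hitB, hk]
      rw [h1, h2, ih]
    · by_cases hp : PySem.Int.mod (cval n v j k) g = 0 ∧ cval n v j k ≠ g
      · have h1 : sK g n v j (PySem.List.pyRepeat (PySem.Int.toChars v) j) none k
            = some (cval n v j k) := by
          simp only [sK, cval] at hp ⊢
          rw [if_pos hk, if_pos hp]
        have h2 : hitB n g v j k = true := by simp [hitB, pokB, hk, hp]
        rw [h1, h2, sK_keep]
        rfl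
      · have h1 : sK g n v j (PySem.List.pyRepeat (PySem.Int.toChars v) j) none k = none := by
          simp only [sK, cval] at hp ⊢
          rw [if_pos hk, if_neg hp]
        have h2 : hitB n g v j k = false := by simp [hitB, pokB, hk, hp]
        rw [h1, h2, ih]

lemma sJ_fold_eq (g n v : Int) (js : List Int) :
    js.foldl (sJ g n v (PySem.Int.toChars v)) none
      = js.findSome? (fun j => ((PySem.List.pyRange 0 10 1).find? (hitB n g v j)).map (cval n v j)) := by
  induction js with
  | nil => rfl
  | cons j js ih =>
    simp only [List.foldl_cons, List.findSome?_cons]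
    have h1 : sJ g n v (PySem.Int.toChars v) none j
        = ((PySem.List.pyRange 0 10 1).find? (hitB n g v j)).map (cval n v j) := by
      simp only [sJ]
      exact sK_fold_eq g n v j _
    rw [h1]
    cases hf : ((PySem.List.pyRange 0 10 1).find? (hitB n g v j)).map (cval n v j) with
    | some x => rw [sJ_keep]
    | none => exact ih

-- ---- B's inner j-scan as find? ----

lemma bFind_fold_eq (n g v k : Int) (js : List Int) :
    js.foldl (bFind n g v k) none
      = (js.find? (fun j => pokB n g v j k)).map (fun j => (j, k, cval n v j k)) := by
  induction js with
  | nil => rfl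
  | cons j js ih =>
    simp only [List.foldl_cons, List.find?_cons]
    by_cases hp : PySem.Int.mod (cval n v j k) g = 0 ∧ cval n v j k ≠ g
    · have h1 : bFind n g v k none j = some (j, k, cval n v j k) := by
        simp only [bFind, cval] at hp ⊢
        rw [if_pos hp]
      have h2 : pokB n g v j k = true := by simp [pokB, hp]
      rw [h1, h2, bFind_keep]
      rfl
    · have h1 : bFind n g v k none j = none := by
        simp only [bFind, cval] at hp ⊢
        rw [if_neg hp]
      have h2 : pokB n g v j k = false := by simp [pokB, hp]
      rw [h1, h2, ih]

-- ---- find? on an integer range returns the least hit ----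

lemma find?_pyRange_some (p : Int → Bool) :
    ∀ (m : Nat) (a b x : Int), (b - a).toNat = m →
      (PySem.List.pyRange a b 1).find? p = some x →
      a ≤ x ∧ x < b ∧ p x = true ∧ ∀ y, a ≤ y → y < x → p y = false := by
  intro m
  induction m with
  | zero =>
    intro a b x hm h
    rw [PySem.List.pyRange_one_eq_nil (by omega)] at h
    simp at h
  | succ m ih =>
    intro a b x hm h
    have hab : a < b := by omega
    rw [PySem.List.pyRange_one_cons hab, List.find?_cons] at h
    cases hpa : p a with
    | true =>
      rw [hpa] at h
      simp only [Option.some.injEq] at h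
      subst h
      exact ⟨le_refl a, hab, hpa, fun y h1 h2 => by omega⟩
    | false =>
      rw [hpa] at h
      obtain ⟨h1, h2, h3, h4⟩ := ih (a + 1) b x (by omega) h
      refine ⟨by omega, h2, h3, fun y hy1 hy2 => ?_⟩
      rcases eq_or_lt_of_le hy1 with rfl | hy
      · exact hpa
      · exact h4 y (by omega) hy2

lemma find?_pyRange_eq_some (p : Int → Bool) (a b x : Int)
    (ha : a ≤ x) (hb : x < b) (hp : p x = true)
    (hmin : ∀ y, a ≤ y → y < x → p y = false) :
    (PySem.List.pyRange a b 1).find? p = some x := by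
  rw [PySem.List.pyRange_one_append a x b ha (by omega), List.find?_append]
  have h1 : (PySem.List.pyRange a x 1).find? p = none := by
    rw [List.find?_eq_none]
    intro y hy
    have := PySem.List.mem_pyRange_one.mp hy
    simp [hmin y this.1 this.2]
  rw [h1, PySem.List.pyRange_one_cons hb, List.find?_cons, hp]
  rfl

lemma find?_pyRange_eq_none (p : Int → Bool) (a b : Int)
    (h : ∀ y, a ≤ y → y < b → p y = false) :
    (PySem.List.pyRange a b 1).find? p = none := by
  rw [List.find?_eq_none]
  intro y hy
  have := PySem.List.mem_pyRange_one.mp hy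
  simp [h y this.1 this.2]

-- ---- loop invariant for B's k-major best-so-far scan:
--      the state is the lexicographically least hit (j, k) with k among the processed digits ----

def InvB (n g v a : Int) (st : Option (Int × Int × Int)) : Prop :=
  match st with
  | none => ∀ k j, 0 ≤ k → k < a → 1 ≤ j → j < n → hitB n g v j k = false
  | some r =>
      r.2.2 = cval n v r.1 r.2.1 ∧ 0 ≤ r.2.1 ∧ r.2.1 < a ∧ 1 ≤ r.1 ∧ r.1 < n ∧
      hitB n g v r.1 r.2.1 = true ∧
      ∀ k j, 0 ≤ k → k < a → 1 ≤ j → j < n → hitB n g v j k = true →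
        (r.1 < j ∨ (r.1 = j ∧ r.2.1 ≤ k))

lemma invB_step (n g v a : Int) (st : Option (Int × Int × Int)) (ha : 0 ≤ a)
    (h : InvB n g v a st) : InvB n g v (a + 1) (bKstep n g v st a) := by
  by_cases hav : a = v
  · -- k == v is skipped; the new digit can never be a hit
    have hno : ∀ j, hitB n g v j a = false := by
      intro j; simp [hitB, hav]
    simp only [bKstep, if_pos hav]
    cases st with
    | none =>
      intro k j hk hka hj hjn
      rcases lt_or_ge k a with h' | h'
      · exact h k j hk h' hj hjn
      · have : k = a := by omega
        subst this; exact hno j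
    | some r =>
      obtain ⟨h1, h2, h3, h4, h5, h6, h7⟩ := h
      refine ⟨h1, h2, by omega, h4, h5, h6, ?_⟩
      intro k j hk hka hj hjn hhit
      rcases lt_or_ge k a with h' | h'
      · exact h7 k j hk h' hj hjn hhit
      · have : k = a := by omega
        subst this; rw [hno j] at hhit; exact absurd hhit (by simp)
  · -- k != a: scan j below the current best split point
    have hhit_iff : ∀ j, hitB n g v j a = pokB n g v j a := by
      intro j; simp [hitB, hav]
    simp only [bKstep, if_neg hav]
    cases st with
    | none =>
      simp only
      rw [bFind_fold_eq]
      cases hf : (PySem.List.pyRange 1 n 1).find? (fun j => pokB n g v j a) with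
      | none =>
        simp only [Option.map_none]
        intro k j hk hka hj hjn
        rcases lt_or_ge k a with h' | h'
        · exact h k j hk h' hj hjn
        · have : k = a := by omega
          subst this
          rw [hhit_iff j]
          have := List.find?_eq_none.mp hf j (PySem.List.mem_pyRange_one.mpr ⟨hj, hjn⟩)
          simpa using this
      | some j1 =>
        obtain ⟨hj1, hj1n, hp1, hmin⟩ := find?_pyRange_some _ (n - 1).toNat 1 n j1 rfl hf
        simp only [Option.map_some]
        refine ⟨rfl, show (0:Int) ≤ a from ha, show a < a + 1 by omega, hj1, hj1n,
          show hitB n g v j1 a = true by rw [hhit_iff]; exact hp1, ?_⟩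
        intro k j hk hka hj hjn hhit
        rcases lt_or_ge k a with h' | h'
        · rw [h k j hk h' hj hjn] at hhit; exact absurd hhit (by simp)
        · have : k = a := by omega
          subst this
          rw [hhit_iff j] at hhit
          by_cases hjj : j < j1
          · rw [hmin j hj hjj] at hhit; exact absurd hhit (by simp)
          · rcases eq_or_lt_of_le (not_lt.mp hjj) with h'' | h''
            · exact Or.inr ⟨h'', le_refl _⟩
            · exact Or.inl h''
    | some r =>
      obtain ⟨h1, h2, h3, h4, h5, h6, h7⟩ := h
      simp only
      rw [bFind_fold_eq]
      cases hf : (PySem.List.pyRange 1 r.1 1).find? (fun j => pokB n g v j a) with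
      | none =>
        simp only [Option.map_none]
        refine ⟨h1, h2, by omega, h4, h5, h6, ?_⟩
        intro k j hk hka hj hjn hhit
        rcases lt_or_ge k a with h' | h'
        · exact h7 k j hk h' hj hjn hhit
        · have : k = a := by omega
          subst this
          rw [hhit_iff j] at hhit
          by_cases hjj : j < r.1
          · have := List.find?_eq_none.mp hf j (PySem.List.mem_pyRange_one.mpr ⟨hj, hjj⟩)
            simp only at this
            rw [hhit] at this; exact absurd this (by simp)
          · rcases eq_or_lt_of_le (not_lt.mp hjj) with h'' | h''
            · exact Or.inr ⟨h'', by omega⟩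
            · exact Or.inl h''
      | some j1 =>
        obtain ⟨hj1, hj1r, hp1, hmin⟩ := find?_pyRange_some _ (r.1 - 1).toNat 1 r.1 j1 rfl hf
        simp only [Option.map_some]
        refine ⟨rfl, show (0:Int) ≤ a from ha, show a < a + 1 by omega, hj1,
          show j1 < n by omega,
          show hitB n g v j1 a = true by rw [hhit_iff]; exact hp1, ?_⟩
        intro k j hk hka hj hjn hhit
        rcases lt_or_ge k a with h' | h'
        · have := h7 k j hk h' hj hjn hhit
          rcases this with h'' | h''
          · exact Or.inl (show j1 < j by omega)
          · exact Or.inl (show j1 < j by omega)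
        · have : k = a := by omega
          subst this
          rw [hhit_iff j] at hhit
          by_cases hjj : j < j1
          · rw [hmin j hj hjj] at hhit; exact absurd hhit (by simp)
          · rcases eq_or_lt_of_le (not_lt.mp hjj) with h'' | h''
            · exact Or.inr ⟨h'', le_refl _⟩
            · exact Or.inl h''

lemma invB_fold (n g v : Int) :
    ∀ (m : Nat) (a : Int) (st : Option (Int × Int × Int)), 0 ≤ a → InvB n g v a st →
      InvB n g v (a + (m : Int)) ((PySem.List.pyRange a (a + (m : Int)) 1).foldl (bKstep n g v) st) := by
  intro m
  induction m with
  | zero =>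
    intro a st ha h
    rw [PySem.List.pyRange_one_eq_nil (by omega)]
    simpa using h
  | succ m ih =>
    intro a st ha h
    have hcast : a + ((m + 1 : Nat) : Int) = (a + 1) + (m : Int) := by push_cast; ring
    rw [hcast, PySem.List.pyRange_one_cons (by omega), List.foldl_cons]
    exact ih (a + 1) (bKstep n g v st a) (by omega) (invB_step n g v a st ha h)

-- ---- per-v: the clean j-major scan equals B's pruned k-major scan ----

lemma perv_eq (n g v : Int) :
    (PySem.List.pyRange 1 n 1).foldl (sJ g n v (PySem.Int.toChars v)) none
      = (match (PySem.List.pyRange 0 10 1).foldl (bKstep n g v) none with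
         | some r => some r.2.2
         | none => none) := by
  rw [sJ_fold_eq]
  have hInv : InvB n g v 10 ((PySem.List.pyRange 0 10 1).foldl (bKstep n g v) none) := by
    have h0 : InvB n g v 0 none := by
      intro k j hk hka _ _
      omega
    have := invB_fold n g v 10 0 none (le_refl 0) h0
    simpa using this
  cases hst : (PySem.List.pyRange 0 10 1).foldl (bKstep n g v) none with
  | none =>
    rw [hst] at hInv
    simp only
    rw [List.findSome?_eq_none_iff]
    intro j hj
    have hjb := PySem.List.mem_pyRange_one.mp hj
    rw [find?_pyRange_eq_none]
    · rfl
    · intro k hk1 hk2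
      exact hInv k j hk1 hk2 hjb.1 hjb.2
  | some r =>
    rw [hst] at hInv
    obtain ⟨hb, hk0, hk10, hj1, hjn, hhit, hmin⟩ := hInv
    simp only
    rw [PySem.List.pyRange_one_append 1 r.1 n hj1 (by omega), List.findSome?_append]
    have hfirst : (PySem.List.pyRange 1 r.1 1).findSome?
        (fun j => ((PySem.List.pyRange 0 10 1).find? (hitB n g v j)).map (cval n v j)) = none := by
      rw [List.findSome?_eq_none_iff]
      intro j hj
      have hjb := PySem.List.mem_pyRange_one.mp hj
      rw [find?_pyRange_eq_none]
      · rfl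
      · intro k hk1 hk2
        by_contra hcon
        have htrue : hitB n g v j k = true := by
          cases h' : hitB n g v j k with
          | true => rfl
          | false => exact absurd h' hcon
        have := hmin k j hk1 hk2 hjb.1 (by omega) htrue
        omega
    rw [hfirst]
    rw [PySem.List.pyRange_one_cons hjn, List.findSome?_cons]
    have hfind : (PySem.List.pyRange 0 10 1).find? (hitB n g v r.1) = some r.2.1 := by
      apply find?_pyRange_eq_some _ _ _ _ hk0 hk10 hhit
      intro y hy1 hy2
      by_contra hcon
      have htrue : hitB n g v r.1 y = true := by
        cases h' : hitB n g v r.1 y with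
        | true => rfl
        | false => exact absurd h' hcon
      have := hmin y r.1 hy1 (by omega) hj1 hjn htrue
      omega
    rw [hfind]
    simp [hb]

-- ===== VERDICT (by name: the statement is the Claim_ definition above) =====
theorem built_spec : Claim_equal_built := by
  intro n g _ _
  unfold Spec_built built built_alt
  refine PySem.List.foldl_congr_mem _ _ _ _ ?_
  intro r v _
  cases r with
  | some x => rfl
  | none =>
    simp only
    rw [per_v g n v, perv_eq n g v]
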